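-- pv_equiv track=rewrite | github.com/Fazendaaa/weekly-exercises | src/python/src/weekly_exercises/killerSudokuHelper.py | killerSudokuHelper
-- ===== SOURCE A (Python) =====
-- from itertools import combinations
--
-- def killerSudokuHelper(
--     cage_sum: int, cage_size: int, constraints: set[int] = None
-- ) -> list[tuple[int]]:
--     """
--     This function takes in a cage, its sum, and the size of the Sudoku grid.
--     It returns a list of all valid combinations for the cage, given the sum and size constraints.
--     """
--
--     if constraints is None:
--         constraints = set()
--
--     digits = [1, 2, 3, 4, 5, 6, 7, 8, 9]
--     valid_combinations: list[tuple[int]] = []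
--
--     for combo in combinations(digits, cage_size):
--         if sum(combo) != cage_sum:
--             continue
--
--         if len(set(combo)) != cage_size:
--             continue
--
--         if constraints and any(d in constraints for d in combo):
--             continue
--
--         valid_combinations.append(combo)
--
--     valid_combinations.sort()
--
--     return valid_combinations
-- ===== SOURCE B (Python) =====
-- def killerSudokuHelper(cage_sum, cage_size, constraints=None):
--     """Recursive backtracking over the remaining digits instead of
--     generate-filter-sort over all combinations; output is produced
--     already in sorted order."""
--     cs = constraints if constraints is not None else set()
--     results = []
--
--     def go(digits, size, rem, chosen):
--         if size <= 0:
--             if size == 0 and rem == 0: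
--                 results.append(chosen)
--             return
--         if len(digits) < size:
--             return
--         d, rest = digits[0], digits[1:]
--         if d not in cs:
--             go(rest, size - 1, rem - d, chosen + (d,))
--         go(rest, size, rem, chosen)
--
--     go([1, 2, 3, 4, 5, 6, 7, 8, 9], cage_size, cage_sum, ())
--     return results
-- ===== Notes on version B (the rewrite author's own statement) =====
-- stated objective: alternative
-- what changed: Replaces the generate-all-combinations / filter / sort pipeline with a recursive backtracking search over the remaining digits that skips constrained digits as it branches and emits results already in sorted order, so no final sort is needed.
import Mathlib
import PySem

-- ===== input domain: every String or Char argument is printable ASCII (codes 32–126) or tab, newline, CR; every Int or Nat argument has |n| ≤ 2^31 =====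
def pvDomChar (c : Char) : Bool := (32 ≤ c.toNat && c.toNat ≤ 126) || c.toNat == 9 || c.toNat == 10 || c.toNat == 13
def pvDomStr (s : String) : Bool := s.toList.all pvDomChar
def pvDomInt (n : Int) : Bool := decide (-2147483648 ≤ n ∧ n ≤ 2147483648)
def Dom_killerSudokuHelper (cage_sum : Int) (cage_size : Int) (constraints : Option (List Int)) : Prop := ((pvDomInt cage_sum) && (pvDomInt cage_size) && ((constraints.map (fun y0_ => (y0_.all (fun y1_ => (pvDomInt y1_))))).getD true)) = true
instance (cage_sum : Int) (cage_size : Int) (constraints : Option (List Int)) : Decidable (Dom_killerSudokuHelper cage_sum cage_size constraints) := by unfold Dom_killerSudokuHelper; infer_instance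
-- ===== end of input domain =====

-- B replaces A's generate-all-combinations / filter / sort pipeline with a recursive
-- backtracking search over the remaining digits that emits results already in sorted order
-- (objective: alternative decomposition of the same search).

-- ===== PORT A =====
-- literal port: enumerate itertools.combinations([1..9], cage_size), skip on the three
-- `continue` tests, append otherwise, then sort.
def killerSudokuHelper (cage_sum : Int) (cage_size : Int) (constraints : Option (List Int)) : List (List Int) :=
  let cs := constraints.getD []
  let digits : List Int := [1, 2, 3, 4, 5, 6, 7, 8, 9]
  let valid := (PySem.List.combinations digits cage_size.toNat).foldl
    (fun acc combo =>
      if combo.sum ≠ cage_sum then acc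
      else if ((PySem.Set.ofList combo).length : Int) ≠ cage_size then acc
      else if cs ≠ [] ∧ combo.any (fun d => cs.contains d) then acc
      else acc ++ [combo]) []
  PySem.List.sorted valid (fun x => x) false

-- ===== PORT B =====
-- literal port of Source B's backtracking helper `go(digits, size, rem, chosen)`
def pvGoB (cs : List Int) (digits : List Int) (size : Int) (rem : Int) (chosen : List Int) :
    List (List Int) :=
  if size ≤ 0 then
    if size = 0 ∧ rem = 0 then [chosen] else []
  else if (digits.length : Int) < size then []
  else
    match digits with
    | [] => []          -- unreachable: 1 ≤ size ≤ digits.length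
    | d :: rest =>
        (if cs.contains d then [] else pvGoB cs rest (size - 1) (rem - d) (chosen ++ [d])) ++
        pvGoB cs rest size rem chosen
termination_by structural digits

def killerSudokuHelper_alt (cage_sum : Int) (cage_size : Int) (constraints : Option (List Int)) : List (List Int) :=
  let cs := constraints.getD []
  pvGoB cs [1, 2, 3, 4, 5, 6, 7, 8, 9] cage_size cage_sum []

-- ===== PRECONDITION & SPEC =====
-- Pre_ excludes cage_size < 0, where itertools.combinations raises ValueError in A (B returns [] there).
def Pre_killerSudokuHelper (cage_sum : Int) (cage_size : Int) (constraints : Option (List Int)) : Prop :=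
  0 ≤ cage_size
instance (cage_sum : Int) (cage_size : Int) (constraints : Option (List Int)) : Decidable (Pre_killerSudokuHelper cage_sum cage_size constraints) := by unfold Pre_killerSudokuHelper; infer_instance

def pvWitness_killerSudokuHelper : Int × Int × Option (List Int) := (10, 3, some [5])

def Spec_killerSudokuHelper (cage_sum : Int) (cage_size : Int) (constraints : Option (List Int)) (out : List (List Int)) : Prop := out = killerSudokuHelper_alt cage_sum cage_size constraints
instance (cage_sum : Int) (cage_size : Int) (constraints : Option (List Int)) (out : List (List Int)) : Decidable (Spec_killerSudokuHelper cage_sum cage_size constraints out) := by unfold Spec_killerSudokuHelper; infer_instance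

-- ===== CLAIM (what is proved, stated in full; the proofs are below) =====
def Claim_equal_killerSudokuHelper : Prop := ∀ (cage_sum : Int) (cage_size : Int) (constraints : Option (List Int)), Dom_killerSudokuHelper cage_sum cage_size constraints → Pre_killerSudokuHelper cage_sum cage_size constraints → Spec_killerSudokuHelper cage_sum cage_size constraints (killerSudokuHelper cage_sum cage_size constraints)

-- ===== LEMMAS AND PROOFS =====

-- B's predicate on a candidate combination
def pvKeep (cs : List Int) (rem : Int) (c : List Int) : Bool :=
  (c.sum == rem) && !(c.any (fun d => cs.contains d))

-- the backtracking search equals "filter the combinations, prefix `chosen`"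
lemma pvGoB_eq (cs : List Int) (l : List Int) (n : Nat) (rem : Int) (chosen : List Int) :
    pvGoB cs l (n : Int) rem chosen
      = ((PySem.List.combinations l n).filter (pvKeep cs rem)).map (chosen ++ ·) := by
  induction l generalizing n rem chosen with
  | nil =>
      cases n with
      | zero =>
          simp only [pvGoB, PySem.List.combinations_zero]
          by_cases h : rem = 0 <;> simp [h, pvKeep] <;> omega
      | succ m =>
          rw [pvGoB]
          simp [PySem.List.combinations_nil_succ]
  | cons d rest ih =>
      cases n with
      | zero =>
          simp only [pvGoB, PySem.List.combinations_zero]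
          by_cases h : rem = 0 <;> simp [h, pvKeep] <;> omega
      | succ m =>
          rw [pvGoB]
          have h1 : ¬ ((m + 1 : Nat) : Int) ≤ 0 := by push_cast; omega
          rw [if_neg h1]
          by_cases h2 : ((d :: rest).length : Int) < ((m + 1 : Nat) : Int)
          · rw [if_pos h2]
            have : (d :: rest).length < m + 1 := by exact_mod_cast h2
            rw [PySem.List.combinations_eq_nil_of_length_lt _ this]
            simp
          · rw [if_neg h2]
            have e1 : ((m + 1 : Nat) : Int) - 1 = (m : Int) := by push_cast; ring
            rw [PySem.List.combinations_cons_succ, List.filter_append, List.map_append,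
              List.filter_map, List.map_map, e1, ih, ih]
            congr 1
            by_cases hd : cs.contains d
            · have hfalse : ∀ c : List Int, (pvKeep cs rem ∘ (d :: ·)) c = false := by
                intro c
                simp only [Function.comp_apply, pvKeep, List.any_cons, hd, Bool.true_or,
                  Bool.not_true, Bool.and_false]
              rw [if_pos hd, List.filter_congr (fun c _ => hfalse c), List.filter_false]
              simp
            · rw [if_neg hd]
              have hd' : cs.contains d = false := by simpa using hd
              have hb : ∀ c : List Int, (d + c.sum == rem) = (c.sum == rem - d) := by
                intro c
                by_cases h : c.sum = rem - d
                · simp [h, show d + (rem - d) = rem from by ring]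
                · have h2 : ¬ d + c.sum = rem := by omega
                  simp [h2]
                  omega
              have hp : ∀ c : List Int, (pvKeep cs rem ∘ (d :: ·)) c = pvKeep cs (rem - d) c := by
                intro c
                simp only [Function.comp_apply, pvKeep, List.any_cons, hd', Bool.false_or,
                  List.sum_cons, hb c]
              rw [List.filter_congr (fun c _ => hp c)]
              apply List.map_congr_left
              intro c _
              simp

-- combinations of a strictly increasing list are strictly increasing in the
-- lexicographic order on lists
lemma pvCombs_sorted (l : List Int) (h : l.Pairwise (· < ·)) (r : Nat) :
    (PySem.List.combinations l r).Pairwise (· < ·) := by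
  induction l generalizing r with
  | nil =>
      cases r with
      | zero => simp [PySem.List.combinations_zero]
      | succ m => simp [PySem.List.combinations_nil_succ]
  | cons x xs ih =>
      cases r with
      | zero => simp [PySem.List.combinations_zero]
      | succ m =>
          rw [PySem.List.combinations_cons_succ]
          have hxs : xs.Pairwise (· < ·) := (List.pairwise_cons.mp h).2
          have hx : ∀ y ∈ xs, x < y := (List.pairwise_cons.mp h).1
          rw [List.pairwise_append]
          refine ⟨?_, ih hxs (m + 1), ?_⟩
          · rw [List.pairwise_map]
            exact (ih hxs m).imp (fun hab => by
              rw [List.cons_lt_cons_iff]; exact Or.inr ⟨rfl, hab⟩)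
          · intro a ha b hb
            rcases List.mem_map.mp ha with ⟨c, _, rfl⟩
            have hsub := PySem.List.sublist_of_mem_combinations hb
            have hlen := PySem.List.length_of_mem_combinations hb
            cases b with
            | nil => simp at hlen
            | cons y ys =>
                have hy : y ∈ xs := hsub.subset (by simp)
                rw [List.cons_lt_cons_iff]
                exact Or.inl (hx y hy)

-- PySem.Set.ofList of a duplicate-free list is the list itself
lemma pvFoldlAdd_eq (c acc : List Int) (h : ∀ x ∈ c, x ∉ acc) (hc : c.Nodup) :
    c.foldl PySem.Set.add acc = acc ++ c := by
  induction c generalizing acc with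
  | nil => simp
  | cons x xs ih =>
      have hx : x ∉ acc := h x (by simp)
      simp only [List.foldl_cons]
      have hadd : PySem.Set.add acc x = acc ++ [x] := by
        simp [PySem.Set.add, hx]
      rw [hadd, ih]
      · simp
      · intro y hy
        simp only [List.mem_append, List.mem_singleton]
        rintro (hya | rfl)
        · exact h y (by simp [hy]) hya
        · exact (List.nodup_cons.mp hc).1 hy
      · exact (List.nodup_cons.mp hc).2

lemma pvOfList_eq_self (c : List Int) (h : c.Nodup) : PySem.Set.ofList c = c := by
  have := pvFoldlAdd_eq c [] (by simp) h
  simpa [PySem.Set.ofList, PySem.Set.empty] using this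

theorem killerSudokuHelper_spec : Claim_equal_killerSudokuHelper := by
  intro cage_sum cage_size constraints _ hpre
  unfold Spec_killerSudokuHelper killerSudokuHelper killerSudokuHelper_alt
  obtain ⟨n, rfl⟩ : ∃ n : Nat, cage_size = (n : Int) :=
    ⟨cage_size.toNat, (Int.toNat_of_nonneg hpre).symm⟩
  simp only [Int.toNat_natCast]
  set cs := constraints.getD [] with hcs
  set digits : List Int := [1, 2, 3, 4, 5, 6, 7, 8, 9] with hdig
  have hdnodup : digits.Nodup := by decide
  rw [pvGoB_eq]
  have hfun : ∀ (acc : List (List Int)) (combo : List Int),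
      combo ∈ PySem.List.combinations digits n →
      (if combo.sum ≠ cage_sum then acc
       else if ((PySem.Set.ofList combo).length : Int) ≠ (n : Int) then acc
       else if cs ≠ [] ∧ combo.any (fun d => cs.contains d) then acc
       else acc ++ [combo])
      = if pvKeep cs cage_sum combo then acc ++ [combo] else acc := by
    intro acc combo hcm
    have hnd : combo.Nodup := (PySem.List.sublist_of_mem_combinations hcm).nodup hdnodup
    have hlen : combo.length = n := PySem.List.length_of_mem_combinations hcm
    have hset : ((PySem.Set.ofList combo).length : Int) = (n : Int) := by
      rw [pvOfList_eq_self _ hnd, hlen]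
    by_cases hs : combo.sum = cage_sum
    · rw [if_neg (not_not_intro hs), if_neg (not_not_intro hset)]
      by_cases ha : (combo.any fun d => cs.contains d) = true
      · have hne : cs ≠ [] := by
          rcases List.any_eq_true.mp ha with ⟨d, _, hd⟩
          intro h0; rw [h0] at hd; simp at hd
        have hk : pvKeep cs cage_sum combo = false := by
          simp only [pvKeep, ha, Bool.not_true, Bool.and_false]
        rw [if_pos ⟨hne, ha⟩, hk]
        simp
      · have ha' : (combo.any fun d => cs.contains d) = false := by simpa using ha
        have hk : pvKeep cs cage_sum combo = true := by
          simp only [pvKeep, ha', Bool.not_false, Bool.and_true, hs, beq_self_eq_true]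
        rw [if_neg (fun h => ha h.2), hk]
        simp
    · have hb : (combo.sum == cage_sum) = false := by simp [hs]
      have hk : pvKeep cs cage_sum combo = false := by
        simp only [pvKeep, hb, Bool.false_and]
      rw [if_pos hs, hk]
      simp
  rw [PySem.List.foldl_congr_mem _ _ (fun acc combo => if pvKeep cs cage_sum combo then acc ++ [combo] else acc) _ hfun, PySem.List.foldl_append_if_eq_filter]
  have hpair : ((PySem.List.combinations digits n).filter (pvKeep cs cage_sum)).Pairwise
      (fun a b : List Int => a < b) :=
    List.Pairwise.sublist List.filter_sublist (pvCombs_sorted digits (by decide) n)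
  rw [List.nil_append]
  have hmap : List.map (fun x => [] ++ x)
      ((PySem.List.combinations digits n).filter (pvKeep cs cage_sum))
      = (PySem.List.combinations digits n).filter (pvKeep cs cage_sum) := by simp
  rw [hmap]
  have h := PySem.List.sorted_eq_of_perm_of_pairwise_lt
      ((PySem.List.combinations digits n).filter (pvKeep cs cage_sum))
      ((PySem.List.combinations digits n).filter (pvKeep cs cage_sum))
      (fun a => a) (List.Perm.refl _) hpair
  refine Eq.trans ?_ h
  congr 1
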